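-- pv_equiv track=rewrite | github.com/pypi-data/pypi-mirror-358 | packages/quarchCalibration/quarchCalibration-1.1.20-py2.py3-none-any.whl/quarchCalibration/pamHelpers.py | bcdString
-- ===== SOURCE A (Python) =====
-- def bcdString(bcd,padding):
--     # strip off "0x" if present
--     if bcd[:2] == "0x":
--         bcd = bcd [2:]
--     # strip off leading 0's
--     # loop while we have more the required minimum number of characters left
--     while(len(bcd)>padding):
--         # if the leading character is 0, remove it
--         if bcd[0] == '0':
--             bcd = bcd[1:]
--         # else exit loop
--         else:
--             break
--     return bcd
-- ===== SOURCE B (Python) =====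
-- def bcdString(bcd, padding):
--     # strip off "0x" if present
--     if bcd[:2] == "0x":
--         bcd = bcd[2:]
--     # count leading zeros, then remove as many as the minimum length allows, in one slice
--     zeros = len(bcd) - len(bcd.lstrip('0'))
--     removed = min(zeros, max(0, len(bcd) - padding))
--     return bcd[removed:]
-- ===== Notes on version B (the rewrite author's own statement) =====
-- stated objective: simpler
-- what changed: Replaces the character-by-character while-loop trimming with one leading-zero count and a single slice bounded by the minimum length.
import Mathlib
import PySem

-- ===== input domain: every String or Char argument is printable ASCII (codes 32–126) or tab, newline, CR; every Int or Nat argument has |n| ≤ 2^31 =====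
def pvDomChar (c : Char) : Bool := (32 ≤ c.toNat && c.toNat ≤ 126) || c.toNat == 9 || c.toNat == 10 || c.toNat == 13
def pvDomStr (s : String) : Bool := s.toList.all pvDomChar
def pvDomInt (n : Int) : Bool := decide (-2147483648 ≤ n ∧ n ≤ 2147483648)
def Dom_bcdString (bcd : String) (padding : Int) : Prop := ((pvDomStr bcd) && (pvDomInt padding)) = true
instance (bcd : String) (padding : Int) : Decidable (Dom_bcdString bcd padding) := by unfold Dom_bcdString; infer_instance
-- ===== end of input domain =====

-- B replaces A's while-loop trimming by one leading-zero count and a single slice (objective: simpler).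

-- ===== PORT A =====
-- A's while-loop. For the empty string Python would still test len(bcd)>padding and raise
-- IndexError at bcd[0] when padding < 0 (excluded by Pre_); we return [] there.
def pvLoopA : List Char → Int → List Char
  | [], _ => []
  | c :: rest, p =>
      if ((rest.length : Int) + 1) > p then
        (if c = '0' then pvLoopA rest p else c :: rest)
      else c :: rest

def bcdString (bcd : String) (padding : Int) : String :=
  let l := bcd.toList
  -- bcd[:2] == "0x" / bcd[2:]  (nonnegative slice bounds: exactly take 2 / drop 2)
  let l := if l.take 2 = ['0', 'x'] then l.drop 2 else l
  String.mk (pvLoopA l padding)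

-- ===== PORT B =====
def bcdString_alt (bcd : String) (padding : Int) : String :=
  let l := bcd.toList
  let l := if l.take 2 = ['0', 'x'] then l.drop 2 else l
  -- zeros = len(bcd) - len(bcd.lstrip('0'))  (lstrip('0') = dropWhile (= '0') on ASCII)
  let zeros : Int := (l.length : Int) - ((l.dropWhile (· = '0')).length : Int)
  let removed : Int := min zeros (max 0 ((l.length : Int) - padding))
  -- bcd[removed:] with removed ≥ 0: drop removed
  String.mk (l.drop removed.toNat)

-- ===== PRECONDITION & SPEC =====
-- Pre_ excludes exactly the inputs on which A raises IndexError: negative padding with a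
-- string that is all '0' after the optional '0x' prefix (A strips everything, then bcd[0] fails).
def Pre_bcdString (bcd : String) (padding : Int) : Prop :=
  0 ≤ padding ∨
    (let l := bcd.toList;
     let l := if l.take 2 = ['0', 'x'] then l.drop 2 else l;
     l.any (· ≠ '0') = true)
instance (bcd : String) (padding : Int) : Decidable (Pre_bcdString bcd padding) := by
  unfold Pre_bcdString; infer_instance

def pvWitness_bcdString : String × Int := ("0x0012", 2)

def Spec_bcdString (bcd : String) (padding : Int) (out : String) : Prop := out = bcdString_alt bcd padding
instance (bcd : String) (padding : Int) (out : String) : Decidable (Spec_bcdString bcd padding out) := by unfold Spec_bcdString; infer_instance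

-- ===== CLAIM (what is proved, stated in full; the proofs are below) =====
def Claim_equal_bcdString : Prop := ∀ (bcd : String) (padding : Int), Dom_bcdString bcd padding → Pre_bcdString bcd padding → Spec_bcdString bcd padding (bcdString bcd padding)

-- ===== LEMMAS AND PROOFS =====
lemma pvLoopA_eq_drop (l : List Char) (p : Int) :
    pvLoopA l p =
      l.drop (min ((l.length : Int) - ((l.dropWhile (· = '0')).length : Int))
                  (max 0 ((l.length : Int) - p))).toNat := by
  induction l generalizing p with
  | nil => simp [pvLoopA]
  | cons c rest ih =>
    have hz : ((rest.dropWhile (· = '0')).length : Int) ≤ (rest.length : Int) := by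
      exact_mod_cast List.length_dropWhile_le _ _
    by_cases h : ((rest.length : Int) + 1) > p
    · by_cases hc : c = '0'
      · have hdw : (c :: rest).dropWhile (· = '0') = rest.dropWhile (· = '0') := by
          simp [List.dropWhile, hc]
        have hr : min ((rest.length : Int) - ((rest.dropWhile (· = '0')).length : Int))
                      (max 0 ((rest.length : Int) - p)) + 1
                = min (((c :: rest).length : Int) - (((c :: rest).dropWhile (· = '0')).length : Int))
                      (max 0 (((c :: rest).length : Int) - p)) := by
          simp only [hdw, List.length_cons]
          push_cast
          omega
        have hpos : 0 ≤ min ((rest.length : Int) - ((rest.dropWhile (· = '0')).length : Int))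
                      (max 0 ((rest.length : Int) - p)) := by omega
        simp only [pvLoopA, if_pos h, if_pos hc, ih]
        rw [← hr]
        have : (min ((rest.length : Int) - ((rest.dropWhile (· = '0')).length : Int))
                  (max 0 ((rest.length : Int) - p)) + 1).toNat
             = (min ((rest.length : Int) - ((rest.dropWhile (· = '0')).length : Int))
                  (max 0 ((rest.length : Int) - p))).toNat + 1 := by omega
        rw [this]
        simp
      · have hdw : (c :: rest).dropWhile (· = '0') = c :: rest := by
          simp [List.dropWhile, hc]
        have : min (((c :: rest).length : Int) - (((c :: rest).dropWhile (· = '0')).length : Int))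
                   (max 0 (((c :: rest).length : Int) - p)) = 0 := by
          rw [hdw]; omega
        simp [pvLoopA, h, hc]
    · have : min (((c :: rest).length : Int) - (((c :: rest).dropWhile (· = '0')).length : Int))
                 (max 0 (((c :: rest).length : Int) - p)) = 0 := by
        have hdw : ((( c :: rest).dropWhile (· = '0')).length : Int) ≤ ((c :: rest).length : Int) := by
          exact_mod_cast List.length_dropWhile_le _ _
        simp only [List.length_cons] at *
        push_cast at *
        omega
      have hl : pvLoopA (c :: rest) p = c :: rest := by
        unfold pvLoopA; rw [if_neg h]
      rw [hl, this]
      simp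

-- ===== VERDICT (by name: the statement is the Claim_ definition above) =====
theorem bcdString_spec : Claim_equal_bcdString := by
  intro bcd padding _ _
  unfold Spec_bcdString bcdString bcdString_alt
  simp only []
  rw [pvLoopA_eq_drop]
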